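-- pv_equiv track=rewrite | github.com/kacerekz/KKY-ZDO | zdo2022/main.py | InterpolationPadding
-- ===== SOURCE A (Python) =====
-- def InterpolationPadding(positions):
--     newPositions = []
--
--     # Adds empty frames at the start if neccessary
--     for i in range(0, positions[0][0]):
--         newPos = [i, positions[0][1]]
--         newPositions.append(newPos)
--
--     newPositions.append(positions[0])
--
--     for i in range(1, len(positions)):
--         # frame index - get 2 consecutive saved frames
--         index2 = positions[i][0]
--         index1 = positions[i-1][0]
--
--         # distance in between the two frames time
--         diff = index2 - index1
--         for c in range(0, diff-1):
--             newPositions.append([index1 + (c+1), positions[i-1][1]])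
--
--         newPositions.append(positions[i])
--
--     return newPositions
-- ===== SOURCE B (Python) =====
-- def InterpolationPadding(positions):
--     def gaps(prev, rest):
--         if not rest:
--             return []
--         cur = rest[0]
--         filler = [[f, prev[1]] for f in range(prev[0] + 1, cur[0])]
--         return filler + [cur] + gaps(cur, rest[1:])
--
--     first = positions[0]
--     prefix = [[f, first[1]] for f in range(first[0])]
--     return prefix + [first] + gaps(first, positions[1:])
-- ===== Notes on version B (the rewrite author's own statement) =====
-- stated objective: alternative
-- what changed: Replaces A's imperative accumulator loops over indices (positions[i]/positions[i-1] with an inner gap-counter loop appending to newPositions) by an index-free decomposition: a prefix comprehension plus a structural recursion gaps(prev, rest) that assembles the result by concatenating per-gap comprehension segments.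
import Mathlib
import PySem

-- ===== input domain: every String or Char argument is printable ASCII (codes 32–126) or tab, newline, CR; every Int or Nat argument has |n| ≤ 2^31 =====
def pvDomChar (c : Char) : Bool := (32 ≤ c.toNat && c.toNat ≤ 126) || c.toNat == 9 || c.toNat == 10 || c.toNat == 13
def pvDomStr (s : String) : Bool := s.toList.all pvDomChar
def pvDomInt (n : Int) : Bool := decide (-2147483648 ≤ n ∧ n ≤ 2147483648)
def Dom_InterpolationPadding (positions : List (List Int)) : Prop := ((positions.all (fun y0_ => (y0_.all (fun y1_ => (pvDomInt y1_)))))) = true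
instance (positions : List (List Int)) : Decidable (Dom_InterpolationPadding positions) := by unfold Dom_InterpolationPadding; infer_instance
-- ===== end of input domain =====

-- B replaces A's imperative accumulator loops over indices by an index-free recursive
-- decomposition (prefix comprehension + structural recursion over the tail, assembled by
-- concatenation); objective: alternative (same cost, return value proved equal on Pre_).

-- ===== PORT A =====
def InterpolationPadding (positions : List (List Int)) : List (List Int) :=
  let p0 := PySem.List.pyGetD positions 0 []
  -- for i in range(0, positions[0][0]): newPositions.append([i, positions[0][1]])
  let np1 := (PySem.List.pyRange 0 (PySem.List.pyGetD p0 0 0) 1).foldl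
      (fun acc i => acc ++ [[i, PySem.List.pyGetD p0 1 0]]) []
  -- newPositions.append(positions[0])
  let np2 := np1 ++ [p0]
  -- for i in range(1, len(positions)): …
  (PySem.List.pyRange 1 ((positions.length : Nat) : Int) 1).foldl
    (fun acc i =>
      let index2 := PySem.List.pyGetD (PySem.List.pyGetD positions i []) 0 0
      let index1 := PySem.List.pyGetD (PySem.List.pyGetD positions (i - 1) []) 0 0
      let diff := index2 - index1
      let acc2 := (PySem.List.pyRange 0 (diff - 1) 1).foldl
        (fun a c => a ++ [[index1 + (c + 1), PySem.List.pyGetD (PySem.List.pyGetD positions (i - 1) []) 1 0]]) acc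
      acc2 ++ [PySem.List.pyGetD positions i []]) np2

-- ===== PORT B =====
-- the comprehension '[[f, v] for f in range(a, b)]'
def pvFill (a b v : Int) : List (List Int) :=
  (PySem.List.pyRange a b 1).map (fun f => [f, v])

-- gaps(prev, rest): structural recursion on rest (rest[0] / rest[1:] = head / tail)
def pvGaps : List Int → List (List Int) → List (List Int)
  | _, [] => []
  | prev, cur :: rest =>
      pvFill (PySem.List.pyGetD prev 0 0 + 1) (PySem.List.pyGetD cur 0 0)
        (PySem.List.pyGetD prev 1 0)
        ++ [cur] ++ pvGaps cur rest

def InterpolationPadding_alt (positions : List (List Int)) : List (List Int) :=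
  let first := PySem.List.pyGetD positions 0 []
  -- prefix + [first] + gaps(first, positions[1:])
  pvFill 0 (PySem.List.pyGetD first 0 0) (PySem.List.pyGetD first 1 0)
    ++ [first] ++ pvGaps first (positions.drop 1)

-- ===== PRECONDITION & SPEC =====
-- Pre_ is exactly the set of inputs on which Python A returns normally: the list is
-- nonempty, every entry is nonempty (entry[0] is always read), and entry[1] exists
-- wherever a filler row actually needs it (first entry when the prefix loop runs,
-- entry i when the gap to entry i+1 is larger than 1); everywhere else A raises IndexError.
def Pre_InterpolationPadding (positions : List (List Int)) : Prop :=
  positions ≠ [] ∧ (∀ p ∈ positions, p ≠ []) ∧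
  (0 < PySem.List.pyGetD (PySem.List.pyGetD positions 0 []) 0 0 →
    2 ≤ (PySem.List.pyGetD positions 0 []).length) ∧
  ∀ i ∈ List.range (positions.length - 1),
    1 < PySem.List.pyGetD (positions.getD (i + 1) []) 0 0
        - PySem.List.pyGetD (positions.getD i []) 0 0 →
    2 ≤ (positions.getD i []).length
instance (positions : List (List Int)) : Decidable (Pre_InterpolationPadding positions) := by
  unfold Pre_InterpolationPadding; infer_instance
def pvWitness_InterpolationPadding : List (List Int) := [[0, 5], [3, 7]]

def Spec_InterpolationPadding (positions : List (List Int)) (out : List (List Int)) : Prop := out = InterpolationPadding_alt positions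
instance (positions : List (List Int)) (out : List (List Int)) : Decidable (Spec_InterpolationPadding positions out) := by unfold Spec_InterpolationPadding; infer_instance

-- ===== CLAIM (what is proved, stated in full; the proofs are below) =====
def Claim_equal_InterpolationPadding : Prop := ∀ (positions : List (List Int)), Dom_InterpolationPadding positions → Pre_InterpolationPadding positions → Spec_InterpolationPadding positions (InterpolationPadding positions)

-- ===== LEMMAS AND PROOFS =====

lemma pvFill_reindex (i1 i2 v : Int) :
    (PySem.List.pyRange 0 (i2 - i1 - 1) 1).map (fun c => [i1 + (c + 1), v])
      = pvFill (i1 + 1) i2 v := by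
  unfold pvFill
  rw [PySem.List.pyRange_one, PySem.List.pyRange_one]
  have h : (i2 - i1 - 1 - 0).toNat = (i2 - (i1 + 1)).toNat := by omega
  rw [h, List.map_map, List.map_map]
  apply List.map_congr_left
  intro k _
  simp
  ring

lemma pvGaps_snoc (rest : List (List Int)) : ∀ (p c : List Int),
    pvGaps p (rest ++ [c])
      = pvGaps p rest
        ++ pvFill (PySem.List.pyGetD ((p :: rest).getLast (by simp)) 0 0 + 1)
             (PySem.List.pyGetD c 0 0)
             (PySem.List.pyGetD ((p :: rest).getLast (by simp)) 1 0)
        ++ [c] := by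
  induction rest with
  | nil => intro p c; simp [pvGaps]
  | cons r rs ih =>
      intro p c
      simp only [List.cons_append, pvGaps, ih r c, List.getLast_cons_cons]
      simp [List.append_assoc]

lemma pyGetD_snoc_lt (l : List (List Int)) (c d : List Int) (i : Int) (h0 : 0 ≤ i) (h : i < l.length) :
    PySem.List.pyGetD (l ++ [c]) i d = PySem.List.pyGetD l i d := by
  rw [PySem.List.pyGetD_eq_getElem (l ++ [c]) d h0 (by simp; omega),
      PySem.List.pyGetD_eq_getElem l d h0 (by exact_mod_cast h)]
  rw [List.getElem_append_left]

lemma pyGetD_snoc_self (l : List (List Int)) (c d : List Int) :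
    PySem.List.pyGetD (l ++ [c]) (l.length : Int) d = c := by
  rw [PySem.List.pyGetD_eq_getElem (l ++ [c]) d (by omega) (by simp)]
  simp

lemma mainA_foldl (rest : List (List Int)) : ∀ (p : List Int) (init : List (List Int)),
    (PySem.List.pyRange 1 (((p :: rest).length : Nat) : Int) 1).foldl
      (fun acc i =>
        let index2 := PySem.List.pyGetD (PySem.List.pyGetD (p :: rest) i []) 0 0
        let index1 := PySem.List.pyGetD (PySem.List.pyGetD (p :: rest) (i - 1) []) 0 0
        let diff := index2 - index1
        let acc2 := (PySem.List.pyRange 0 (diff - 1) 1).foldl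
          (fun a c => a ++ [[index1 + (c + 1), PySem.List.pyGetD (PySem.List.pyGetD (p :: rest) (i - 1) []) 1 0]]) acc
        acc2 ++ [PySem.List.pyGetD (p :: rest) i []]) init
    = init ++ pvGaps p rest := by
  induction rest using List.reverseRecOn with
  | nil =>
      intro p init
      simp [pvGaps, PySem.List.pyRange_one_eq_nil]
  | append_singleton rs c ih =>
      intro p init
      have hlen : ((((p :: (rs ++ [c])).length : Nat)) : Int) = ((rs.length : Int) + 1) + 1 := by
        simp
      rw [hlen, PySem.List.pyRange_one_succ_right (by omega), List.foldl_append]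
      have hsplit : (p :: (rs ++ [c])) = (p :: rs) ++ [c] := by simp
      have hcongr :
          (PySem.List.pyRange 1 ((rs.length : Int) + 1) 1).foldl
            (fun acc i =>
              let index2 := PySem.List.pyGetD (PySem.List.pyGetD (p :: (rs ++ [c])) i []) 0 0
              let index1 := PySem.List.pyGetD (PySem.List.pyGetD (p :: (rs ++ [c])) (i - 1) []) 0 0
              let diff := index2 - index1
              let acc2 := (PySem.List.pyRange 0 (diff - 1) 1).foldl
                (fun a c' => a ++ [[index1 + (c' + 1), PySem.List.pyGetD (PySem.List.pyGetD (p :: (rs ++ [c])) (i - 1) []) 1 0]]) acc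
              acc2 ++ [PySem.List.pyGetD (p :: (rs ++ [c])) i []]) init
          = (PySem.List.pyRange 1 ((rs.length : Int) + 1) 1).foldl
            (fun acc i =>
              let index2 := PySem.List.pyGetD (PySem.List.pyGetD (p :: rs) i []) 0 0
              let index1 := PySem.List.pyGetD (PySem.List.pyGetD (p :: rs) (i - 1) []) 0 0
              let diff := index2 - index1
              let acc2 := (PySem.List.pyRange 0 (diff - 1) 1).foldl
                (fun a c' => a ++ [[index1 + (c' + 1), PySem.List.pyGetD (PySem.List.pyGetD (p :: rs) (i - 1) []) 1 0]]) acc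
              acc2 ++ [PySem.List.pyGetD (p :: rs) i []]) init := by
        apply PySem.List.foldl_congr_mem
        intro a i hi
        rw [PySem.List.mem_pyRange_one] at hi
        rw [hsplit, pyGetD_snoc_lt (p :: rs) c [] i (by omega) (by simp; omega),
            pyGetD_snoc_lt (p :: rs) c [] (i - 1) (by omega) (by simp; omega)]
      have hcast : ((rs.length : Int) + 1) = (((p :: rs).length : Nat) : Int) := by simp
      rw [hcongr, hcast, ih p init]
      have hlast : PySem.List.pyGetD (p :: (rs ++ [c])) (((p :: rs).length : Nat) : Int) [] = c := by
        rw [hsplit, pyGetD_snoc_self]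
      have hprev : PySem.List.pyGetD (p :: (rs ++ [c])) ((((p :: rs).length : Nat) : Int) - 1) []
          = (p :: rs).getLast (by simp) := by
        have h1 : (((p :: rs).length : Nat) : Int) - 1 = (rs.length : Int) := by simp
        rw [hsplit, h1, pyGetD_snoc_lt (p :: rs) c [] _ (by omega) (by simp),
            PySem.List.pyGetD_eq_getElem (p :: rs) [] (by omega) (by simp)]
        rw [List.getLast_eq_getElem]
        simp
      simp only [List.foldl_cons, List.foldl_nil, hlast, hprev,
        PySem.List.foldl_append_singleton_eq_map]
      rw [pvFill_reindex, pvGaps_snoc]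
      simp [List.append_assoc]

-- ===== VERDICT (by name: the statement is the Claim_ definition above) =====
theorem InterpolationPadding_spec : Claim_equal_InterpolationPadding := by
  intro positions _ hpre
  obtain ⟨hne, -⟩ := hpre
  unfold Spec_InterpolationPadding
  cases positions with
  | nil => exact absurd rfl hne
  | cons p rest =>
      unfold InterpolationPadding InterpolationPadding_alt
      simp only [PySem.List.pyGetD_zero_cons, List.drop_one, List.tail_cons]
      rw [mainA_foldl, PySem.List.foldl_append_singleton_eq_map]
      simp only [pvFill, List.nil_append, List.append_assoc]
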